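-- pv_equiv track=rewrite | github.com/AlapanDas/Practical-Files | nofix.py | check
-- ===== SOURCE A (Python) =====
-- def check(arr):
--     flag=1
--     for i in range(len(arr)):
--         if i+1 == int(arr[i]):
--             flag*=1
--             key=i
--         else:
--             flag*=-0
--     if flag==1:
--         # return that its A(i)=i
--         return True
--     else:
--         # return that A(i) not = i
--         return False
-- ===== SOURCE B (Python) =====
-- def check(arr):
--     # Back-to-front countdown: peel matching elements off the end; the array
--     # is the identity permutation 1..n exactly when the countdown reaches 0.
--     n = len(arr)
--     while n and int(arr[n - 1]) == n:
--         n -= 1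
--     return n == 0
-- ===== Notes on version B (the rewrite author's own statement) =====
-- stated objective: simpler
-- what changed: Replaced A's forward index loop with a running int flag (flag *= 1 / flag *= -0 and a dead key variable) by a back-to-front countdown: a while loop peels elements matching their 1-based position off the end and succeeds iff the counter reaches 0; it exits early at the last mismatch instead of always scanning the whole list.
import Mathlib
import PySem

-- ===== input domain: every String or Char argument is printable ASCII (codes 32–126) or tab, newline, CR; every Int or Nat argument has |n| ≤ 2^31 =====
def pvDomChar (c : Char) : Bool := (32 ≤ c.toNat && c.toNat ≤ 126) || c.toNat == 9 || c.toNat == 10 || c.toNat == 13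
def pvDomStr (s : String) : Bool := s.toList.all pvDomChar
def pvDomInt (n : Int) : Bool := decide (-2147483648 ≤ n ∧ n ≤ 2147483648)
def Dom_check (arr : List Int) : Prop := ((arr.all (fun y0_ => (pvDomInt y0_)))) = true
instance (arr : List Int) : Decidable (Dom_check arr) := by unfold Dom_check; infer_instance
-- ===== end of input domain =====

-- B replaces A's forward flag loop by a back-to-front countdown while loop with early exit; objective: simpler (timing run measured it faster on random inputs).

-- ===== PORT A =====
-- the loop: state (flag, key); key is assigned but never read by the return
def checkLoop (arr : List Int) : Int × Option Int :=
  (PySem.List.pyRange 0 (PySem.List.len arr) 1).foldl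
    (fun st i =>
      if i + 1 == PySem.List.pyGetD arr i 0 then (st.1 * 1, some i)
      else (st.1 * (-0), st.2))
    (1, none)

def check (arr : List Int) : Bool :=
  if (checkLoop arr).1 == 1 then true else false

-- ===== PORT B =====
-- the while loop 'while n and int(arr[n-1]) == n: n -= 1'; fuel only totalizes it
def checkWhile (arr : List Int) (fuel : Nat) (n : Int) : Int :=
  match fuel with
  | 0 => n
  | f + 1 =>
    if (n != 0) && (PySem.List.pyGetD arr (n - 1) 0 == n) then checkWhile arr f (n - 1)
    else n

def check_alt (arr : List Int) : Bool :=
  checkWhile arr arr.length (PySem.List.len arr) == 0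

-- ===== PRECONDITION & SPEC =====
def Spec_check (arr : List Int) (out : Bool) : Prop := out = check_alt arr
instance (arr : List Int) (out : Bool) : Decidable (Spec_check arr out) := by unfold Spec_check; infer_instance

-- ===== CLAIM (what is proved, stated in full; the proofs are below) =====
def Claim_equal_check : Prop := ∀ (arr : List Int), Dom_check arr → Spec_check arr (check arr)

-- ===== LEMMAS AND PROOFS =====

-- appended-singleton characterisation of the identity-range equality, shared by both sides
theorem range_split (xs : List Int) (x : Int) :
    (xs ++ [x] = PySem.List.pyRange 1 ((xs.length : Int) + 1 + 1) 1)
      ↔ (xs = PySem.List.pyRange 1 ((xs.length : Int) + 1) 1 ∧ x = (xs.length : Int) + 1) := by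
  rw [PySem.List.pyRange_one_succ_right (a := 1) (b := (xs.length : Int) + 1) (by omega)]
  constructor
  · intro h
    have hlen' : xs.length = (PySem.List.pyRange 1 ((xs.length : Int) + 1) 1).length := by
      rw [PySem.List.length_pyRange_one]; omega
    rcases List.append_inj h hlen' with ⟨h1, h2⟩
    exact ⟨h1, by simpa using h2⟩
  · rintro ⟨h1, h2⟩
    rw [← h1, ← h2]

-- the flag after A's loop is 1 exactly when arr equals [1, …, len(arr)], else 0
theorem checkLoop_fst (arr : List Int) :
    (checkLoop arr).1 =
      (if arr = PySem.List.pyRange 1 ((arr.length : Int) + 1) 1 then 1 else 0) := by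
  unfold checkLoop
  induction arr using List.reverseRecOn with
  | nil => simp [PySem.List.pyRange_one_eq_nil]
  | append_singleton xs x ih =>
    have hlen : PySem.List.len (xs ++ [x]) = (xs.length : Int) + 1 := by
      simp [PySem.List.len]
    rw [hlen]
    rw [PySem.List.pyRange_one_succ_right (a := 0) (b := (xs.length : Int)) (by positivity)]
    rw [List.foldl_append]
    have hcongr :
        (PySem.List.pyRange 0 (xs.length : Int) 1).foldl
          (fun st i =>
            if i + 1 == PySem.List.pyGetD (xs ++ [x]) i 0 then (st.1 * 1, some i)
            else (st.1 * (-0), st.2)) ((1 : Int), (none : Option Int)) =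
        (PySem.List.pyRange 0 (xs.length : Int) 1).foldl
          (fun st i =>
            if i + 1 == PySem.List.pyGetD xs i 0 then (st.1 * 1, some i)
            else (st.1 * (-0), st.2)) ((1 : Int), (none : Option Int)) := by
      apply PySem.List.foldl_congr_mem
      intro acc i hi
      have hmem := (PySem.List.mem_pyRange_one).1 hi
      have h0 : 0 ≤ i := hmem.1
      have h1 : i < (xs.length : Int) := hmem.2
      have : PySem.List.pyGetD (xs ++ [x]) i 0 = PySem.List.pyGetD xs i 0 := by
        rw [PySem.List.pyGetD_eq_getElem (xs ++ [x]) 0 (by omega)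
              (by simp only [List.length_append, List.length_singleton]; push_cast; omega),
            PySem.List.pyGetD_eq_getElem xs 0 (by omega) h1]
        rw [List.getElem_append_left (by omega)]
      rw [this]
    rw [hcongr]
    simp only [List.foldl_cons, List.foldl_nil]
    have hx : PySem.List.pyGetD (xs ++ [x]) (xs.length : Int) 0 = x := by
      rw [PySem.List.pyGetD_eq_getElem (xs ++ [x]) 0 (by omega)
        (by simp only [List.length_append, List.length_singleton]; push_cast; omega)]
      simp
    rw [hx]
    have hL : (((xs ++ [x]).length : Int)) = (xs.length : Int) + 1 := by
      simp
    rw [hL]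
    simp only [PySem.List.len_eq] at ih
    by_cases hc : x = (xs.length : Int) + 1
    · have hbeq : ((xs.length : Int) + 1 == x) = true := by simp [hc]
      rw [if_pos hbeq]
      dsimp only
      rw [ih]
      by_cases hxs : xs = PySem.List.pyRange 1 ((xs.length : Int) + 1) 1
      · rw [if_pos hxs, if_pos ((range_split xs x).2 ⟨hxs, hc⟩)]; ring
      · rw [if_neg hxs, if_neg (fun h => hxs ((range_split xs x).1 h).1)]; ring
    · have hbeq : ((xs.length : Int) + 1 == x) = false := by simp; omega
      rw [if_neg (by simp [hbeq])]
      dsimp only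
      rw [ih]
      rw [if_neg (fun h => hc ((range_split xs x).1 h).2)]
      split_ifs <;> norm_num

-- the countdown reaches 0 exactly when the first n elements are [1, …, n]
theorem checkWhile_zero_iff (arr : List Int) (fuel : Nat) :
    ∀ n : Int, 0 ≤ n → n ≤ (arr.length : Int) → n.toNat ≤ fuel →
      (checkWhile arr fuel n = 0 ↔ arr.take n.toNat = PySem.List.pyRange 1 (n + 1) 1) := by
  induction fuel with
  | zero =>
    intro n h0 _ hf
    have hn : n = 0 := by omega
    subst hn
    simp [checkWhile, PySem.List.pyRange_one_eq_nil]
  | succ f ih =>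
    intro n h0 hlen hf
    by_cases hn0 : n = 0
    · subst hn0
      simp [checkWhile, PySem.List.pyRange_one_eq_nil]
    · have hpos : 0 < n := lt_of_le_of_ne h0 (Ne.symm hn0)
      have hidx0 : (0 : Int) ≤ n - 1 := by omega
      have hidx1 : n - 1 < (arr.length : Int) := by omega
      set m := (n - 1).toNat with hm
      have hmn : n.toNat = m + 1 := by omega
      have hm_lt : m < arr.length := by omega
      have hget : PySem.List.pyGetD arr (n - 1) 0 = arr[m] :=
        PySem.List.pyGetD_eq_getElem arr 0 hidx0 hidx1
      have htake : arr.take n.toNat = arr.take m ++ [arr[m]] := by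
        rw [hmn, List.take_add_one, List.getElem?_eq_getElem hm_lt]
        simp
      have hrange : PySem.List.pyRange 1 (n + 1) 1
          = PySem.List.pyRange 1 n 1 ++ [n] := by
        simpa using PySem.List.pyRange_one_succ_right (a := 1) (b := n) (by omega)
      have hsplit : (arr.take n.toNat = PySem.List.pyRange 1 (n + 1) 1)
          ↔ (arr.take m = PySem.List.pyRange 1 ((n - 1) + 1) 1 ∧ arr[m] = n) := by
        rw [htake, hrange]
        have hn1 : (n - 1) + 1 = n := by omega
        rw [hn1]
        have hlen1 : (arr.take m).length = (PySem.List.pyRange 1 n 1).length := by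
          rw [List.length_take, PySem.List.length_pyRange_one]
          omega
        constructor
        · intro h
          rcases List.append_inj h hlen1 with ⟨h1, h2⟩
          exact ⟨h1, by simpa using h2⟩
        · rintro ⟨h1, h2⟩
          rw [h1, h2]
      by_cases hc : arr[m] = n
      · have hcond : ((n != 0) && (PySem.List.pyGetD arr (n - 1) 0 == n)) = true := by
          rw [hget]
          simp [hc, hn0]
        rw [checkWhile, hcond, if_pos rfl]
        rw [ih (n - 1) (by omega) (by omega) (by omega), ← hm]
        rw [hsplit]
        exact (and_iff_left hc).symm
      · have hcond : ((n != 0) && (PySem.List.pyGetD arr (n - 1) 0 == n)) = false := by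
          rw [hget]
          simp [hc]
        rw [checkWhile, hcond]
        simp only [Bool.false_eq_true, if_false]
        constructor
        · intro h; exact absurd h hn0
        · intro h; exact absurd (hsplit.1 h).2 hc

-- B decides the same identity-range equality
theorem check_alt_eq (arr : List Int) :
    check_alt arr = (arr == PySem.List.pyRange 1 ((arr.length : Int) + 1) 1) := by
  unfold check_alt
  have h := checkWhile_zero_iff arr arr.length (arr.length : Int) (by positivity)
    (le_refl _) (by omega)
  simp only [Int.toNat_natCast, List.take_length] at h
  simp only [PySem.List.len_eq]
  by_cases hr : arr = PySem.List.pyRange 1 ((arr.length : Int) + 1) 1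
  · rw [beq_iff_eq.2 (h.2 hr), beq_iff_eq.2 hr]
  · rw [beq_eq_false_iff_ne.2 hr, beq_eq_false_iff_ne.2 (fun hz => hr (h.1 hz))]

-- ===== VERDICT (by name: the statement is the Claim_ definition above) =====
theorem check_spec : Claim_equal_check := by
  intro arr _
  unfold Spec_check check
  rw [checkLoop_fst, check_alt_eq]
  by_cases h : arr = PySem.List.pyRange 1 ((arr.length : Int) + 1) 1
  · rw [if_pos h, beq_iff_eq.2 h]
    decide
  · rw [if_neg h, beq_eq_false_iff_ne.2 h]
    decide
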